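-- pv_equiv track=rewrite | github.com/letta-ai/letta | letta/functions/schema_generator.py | extract_examples_section
-- ===== SOURCE A (Python) =====
-- from typing import Any, Dict, List, Optional, Tuple, Type, Union, get_args, get_origin
--
-- def extract_examples_section(docstring: Optional[str]) -> Optional[str]:
--     """Extracts the 'Examples:' section from a Google-style docstring.
--
--     Args:
--         docstring (Optional[str]): The full docstring of a function.
--
--     Returns:
--         Optional[str]: The extracted examples section, or None if not found.
--     """
--     if not docstring or "Examples:" not in docstring:
--         return None
--
--     lines = docstring.strip().splitlines()
--     in_examples = False
--     examples_lines = []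
--
--     for line in lines:
--         stripped = line.strip()
--
--         if not in_examples and stripped.startswith("Examples:"):
--             in_examples = True
--             examples_lines.append(line)
--             continue
--
--         if in_examples:
--             if stripped and not line.startswith(" ") and stripped.endswith(":"):
--                 break
--             examples_lines.append(line)
--
--     return "\n".join(examples_lines).strip() if examples_lines else None
-- ===== SOURCE B (Python) =====
-- def _is_header(line):
--     s = line.strip()
--     return bool(s) and not line.startswith(" ") and s.endswith(":")
--
--
-- def _sections(lines):
--     # Recursively split the lines into sections: every dedented 'Header:' line opens a new section.
--     if not lines:
--         return []
--     head, rest = lines[0], lines[1:]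
--     n = 0
--     while n < len(rest) and not _is_header(rest[n]):
--         n += 1
--     return [[head] + rest[:n]] + _sections(rest[n:])
--
--
-- def _from_examples(sec):
--     # The suffix of sec starting at its first 'Examples:' line, or None.
--     for k, line in enumerate(sec):
--         if line.strip().startswith("Examples:"):
--             return sec[k:]
--     return None
--
--
-- def extract_examples_section(docstring):
--     if not docstring or "Examples:" not in docstring:
--         return None
--     for sec in _sections(docstring.strip().splitlines()):
--         tail = _from_examples(sec)
--         if tail is not None:
--             return "\n".join(tail).strip()
--     return None
-- ===== Notes on version B (the rewrite author's own statement) =====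
-- stated objective: alternative
-- what changed: Instead of A's single flag-based accumulator scan, B first recursively partitions the lines into sections (every dedented 'Header:' line opens a new one) and then searches the section list for the first section containing an 'Examples:' line, returning that section's suffix from it.
import Mathlib
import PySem

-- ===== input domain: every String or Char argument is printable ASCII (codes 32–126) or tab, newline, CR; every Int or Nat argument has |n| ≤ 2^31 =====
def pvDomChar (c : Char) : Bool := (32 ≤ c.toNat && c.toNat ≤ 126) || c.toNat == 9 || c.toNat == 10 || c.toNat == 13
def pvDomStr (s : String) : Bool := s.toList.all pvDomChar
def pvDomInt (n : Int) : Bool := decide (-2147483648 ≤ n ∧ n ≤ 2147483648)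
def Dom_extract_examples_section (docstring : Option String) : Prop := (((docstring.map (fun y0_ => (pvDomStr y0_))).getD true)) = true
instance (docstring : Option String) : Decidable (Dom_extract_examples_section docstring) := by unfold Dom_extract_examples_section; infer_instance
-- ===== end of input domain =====

-- B replaces A's flag-based accumulator scan by a section decomposition: the lines are first
-- recursively split into sections (each dedented 'Header:' line opens a new one), then the
-- section list is searched for the first section containing an 'Examples:' line (objective: alternative).

-- shared predicates (the same textual conditions appear in both Pythons):
-- 'line.strip().startswith("Examples:")'
def pvIsStart (line : String) : Bool := PySem.Str.startswith (PySem.Str.strip line) "Examples:"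
-- A's 'stripped and not line.startswith(" ") and stripped.endswith(":")' = B's '_is_header'
def pvIsBreak (line : String) : Bool :=
  (PySem.Str.strip line != "") && !(PySem.Str.startswith line " ") && PySem.Str.endswith (PySem.Str.strip line) ":"

-- ===== PORT A =====
-- the 'for line in lines' loop, state = (in_examples, examples_lines); 'break' returns the accumulator
def pvLoopA : List String → Bool → List String → List String
  | [], _, acc => acc
  | line :: rest, inEx, acc =>
    if !inEx && pvIsStart line then pvLoopA rest true (acc ++ [line])
    else if inEx then
      if pvIsBreak line then acc
      else pvLoopA rest inEx (acc ++ [line])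
    else pvLoopA rest inEx acc

def extract_examples_section (docstring : Option String) : Option String :=
  match docstring with
  | none => none
  | some d =>
    if d == "" || !PySem.Str.isIn "Examples:" d then none
    else
      let lines := PySem.Str.splitlines (PySem.Str.strip d)
      let ex := pvLoopA lines false []
      if ex.isEmpty then none else some (PySem.Str.strip (PySem.Str.join "\n" ex))

-- ===== PORT B =====
-- '_sections': first section = head line plus the following non-header lines (rest[:n]), then recurse on rest[n:]
def pvSplit : List String → List (List String)
  | [] => []
  | l :: t =>
    (l :: t.takeWhile (fun x => !pvIsBreak x)) :: pvSplit (t.dropWhile (fun x => !pvIsBreak x))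
termination_by xs => xs.length
decreasing_by simpa using Nat.lt_succ_of_le (List.length_dropWhile_le _ _)

-- '_from_examples': the 'for k, line in enumerate(sec)' loop returning sec[k:] at the first start line
def pvFrom : List String → Option (List String)
  | [] => none
  | l :: t => if pvIsStart l then some (l :: t) else pvFrom t

-- the 'for sec in _sections(...)' loop with its early return
def pvSearch : List (List String) → Option String
  | [] => none
  | sec :: rest =>
    match pvFrom sec with
    | some tail => some (PySem.Str.strip (PySem.Str.join "\n" tail))
    | none => pvSearch rest

def extract_examples_section_alt (docstring : Option String) : Option String :=
  match docstring with
  | none => none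
  | some d =>
    if d == "" || !PySem.Str.isIn "Examples:" d then none
    else pvSearch (pvSplit (PySem.Str.splitlines (PySem.Str.strip d)))

-- ===== PRECONDITION & SPEC =====
def Spec_extract_examples_section (docstring : Option String) (out : Option String) : Prop := out = extract_examples_section_alt docstring
instance (docstring : Option String) (out : Option String) : Decidable (Spec_extract_examples_section docstring out) := by unfold Spec_extract_examples_section; infer_instance

-- ===== CLAIM =====
def Claim_equal_extract_examples_section : Prop := ∀ (docstring : Option String), Dom_extract_examples_section docstring → Spec_extract_examples_section docstring (extract_examples_section docstring)

-- ===== LEMMAS AND PROOFS =====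

-- the lines A collects: from the first start line, up to (excluding) the next break line
def pvChunk (lines : List String) : List String :=
  match lines.dropWhile (fun l => !pvIsStart l) with
  | [] => []
  | h :: t => h :: t.takeWhile (fun l => !pvIsBreak l)

-- once in_examples is set, A's loop collects exactly the longest prefix without a break line
theorem pvLoopA_true (t : List String) : ∀ acc, pvLoopA t true acc = acc ++ t.takeWhile (fun l => !pvIsBreak l) := by
  induction t with
  | nil => intro acc; simp [pvLoopA]
  | cons h r ih =>
    intro acc
    by_cases hb : pvIsBreak h = true <;> simp [pvLoopA, hb, ih]

-- before it is set, A's loop skips non-start lines: its result is pvChunk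
theorem pvLoopA_false (lines : List String) : ∀ acc, pvLoopA lines false acc = acc ++ pvChunk lines := by
  induction lines with
  | nil => intro acc; simp [pvLoopA, pvChunk]
  | cons h r ih =>
    intro acc
    by_cases hs : pvIsStart h = true
    · simp [pvLoopA, hs, pvLoopA_true, pvChunk]
    · simp [pvLoopA, hs, ih, pvChunk]

theorem pvFrom_none (xs : List String) (h : xs.dropWhile (fun x => !pvIsStart x) = []) :
    pvFrom xs = none := by
  rw [List.dropWhile_eq_nil_iff] at h
  induction xs with
  | nil => rfl
  | cons l t ih =>
    have hs : pvIsStart l = false := by simpa using h l (by simp)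
    simp only [pvFrom, hs, Bool.false_eq_true, if_false]
    exact ih (fun x hx => h x (by simp [hx]))

theorem pvFrom_some (xs : List String) (h t : _) (hx : xs.dropWhile (fun x => !pvIsStart x) = h :: t) :
    pvFrom xs = some (h :: t) := by
  induction xs with
  | nil => simp at hx
  | cons l r ih =>
    by_cases hs : pvIsStart l = true
    · simp [hs] at hx
      obtain ⟨rfl, rfl⟩ := hx
      simp [pvFrom, hs]
    · simp [hs] at hx
      simp [pvFrom, hs, ih hx]

theorem dropWhile_head_false {α : Type} (p : α → Bool) (l : List α) (x : α) (xs : List α)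
    (h : l.dropWhile p = x :: xs) : p x = false := by
  induction l with
  | nil => simp at h
  | cons a t ih =>
    by_cases hp : p a = true
    · simp [hp] at h; exact ih h
    · simp [hp] at h
      rw [← h.1]; simpa using hp

-- the core equality: searching the section decomposition yields A's chunk
theorem pvSearch_split (lines : List String) :
    pvSearch (pvSplit lines) =
      if (pvChunk lines).isEmpty then none
      else some (PySem.Str.strip (PySem.Str.join "\n" (pvChunk lines))) := by
  induction lines using pvSplit.induct with
  | case1 => simp [pvSplit, pvSearch, pvChunk]
  | case2 l t ih =>
    rw [pvSplit]
    by_cases hs : pvIsStart l = true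
    · have hdw : (l :: t).dropWhile (fun x => !pvIsStart x) = l :: t := by
        simp [hs]
      simp [pvSearch, pvFrom, hs, pvChunk, hdw]
    · have hdw : (l :: t).dropWhile (fun x => !pvIsStart x) = t.dropWhile (fun x => !pvIsStart x) := by
        simp [hs]
      have hfrom : pvFrom (l :: t.takeWhile (fun x => !pvIsBreak x)) =
          pvFrom (t.takeWhile (fun x => !pvIsBreak x)) := by
        simp [pvFrom, hs]
      rw [pvSearch, hfrom]
      -- split t at the first break line
      have hsplit : t = t.takeWhile (fun x => !pvIsBreak x) ++ t.dropWhile (fun x => !pvIsBreak x) :=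
        (List.takeWhile_append_dropWhile).symm
      cases htw : (t.takeWhile (fun x => !pvIsBreak x)).dropWhile (fun x => !pvIsStart x) with
      | nil =>
        -- no start line before the first break line: both sides defer to the tail sections
        rw [pvFrom_none _ htw, ih]
        have hd : t.dropWhile (fun x => !pvIsStart x) =
            (t.dropWhile (fun x => !pvIsBreak x)).dropWhile (fun x => !pvIsStart x) := by
          conv_lhs => rw [hsplit]
          rw [List.dropWhile_append]
          simp [htw]
        simp only [pvChunk, hdw, hd]
      | cons h t' =>
        -- the first start line lies before the first break line
        rw [pvFrom_some _ _ _ htw]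
        have hd : t.dropWhile (fun x => !pvIsStart x) =
            h :: (t' ++ t.dropWhile (fun x => !pvIsBreak x)) := by
          conv_lhs => rw [hsplit]
          rw [List.dropWhile_append]
          simp [htw]
        have ht'all : ∀ x ∈ t', pvIsBreak x = false := by
          intro x hx
          have hmem : x ∈ t.takeWhile (fun x => !pvIsBreak x) := by
            have hx2 : x ∈ (t.takeWhile (fun x => !pvIsBreak x)).dropWhile (fun x => !pvIsStart x) := by
              rw [htw]; simp [hx]
            exact (List.dropWhile_sublist _).subset hx2
          simpa using List.mem_takeWhile_imp hmem
        have htake : (t' ++ t.dropWhile (fun x => !pvIsBreak x)).takeWhile (fun x => !pvIsBreak x) = t' := by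
          rw [List.takeWhile_append]
          have h1 : t'.takeWhile (fun x => !pvIsBreak x) = t' :=
            List.takeWhile_eq_self_iff.mpr (by intro x hx; simp [ht'all x hx])
          cases hdd : t.dropWhile (fun x => !pvIsBreak x) with
          | nil => simp [h1]
          | cons d ds =>
            have hdb : pvIsBreak d = true := by
              have := dropWhile_head_false (fun x => !pvIsBreak x) t d ds hdd
              simpa using this
            simp [h1, hdb]
        simp [pvChunk, hdw, hd, htake]

-- ===== VERDICT =====
theorem extract_examples_section_spec : Claim_equal_extract_examples_section := by
  intro docstring _
  unfold Spec_extract_examples_section extract_examples_section extract_examples_section_alt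
  cases docstring with
  | none => rfl
  | some d =>
    by_cases hcond : (d == "" || !PySem.Str.isIn "Examples:" d) = true
    · simp only [hcond, if_true]
    · simp only [Bool.not_eq_true] at hcond
      simp only [hcond, Bool.false_eq_true, if_false]
      simp only [pvSearch_split, pvLoopA_false, List.nil_append]
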